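-- pv_equiv track=rewrite | github.com/AKGIIITH/IRE_Assignment | Assignment_1/query_engine.py | _check_phrase_positions
-- ===== SOURCE A (Python) =====
-- from typing import List, Set, Dict, Tuple
--
-- def _check_phrase_positions(term_positions: List[Set[int]]) -> bool:
--     """Check if term positions form a phrase."""
--     if not term_positions:
--         return False
--
--     # For each position of the first term
--     for pos in term_positions[0]:
--         match = True
--         # Check if subsequent terms appear at consecutive positions
--         for i in range(1, len(term_positions)):
--             if (pos + i) not in term_positions[i]:
--                 match = False
--                 break
--
--         if match:
--             return True
--
--     return False
-- ===== SOURCE B (Python) =====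
-- def _check_phrase_positions(term_positions):
--     """Check if term positions form a phrase."""
--     if not term_positions:
--         return False
--     candidates = set(term_positions[0])
--     offset = 0
--     for positions in term_positions[1:]:
--         offset += 1
--         candidates = {p for p in candidates if p + offset in positions}
--     return bool(candidates)
-- ===== Notes on version B (the rewrite author's own statement) =====
-- stated objective: alternative
-- what changed: Replaces A's per-candidate nested scan (try each position of the first term, test every later term against it) by a single forward pass over the remaining terms that filters the surviving set of phrase-start candidates, answering whether any candidate survives.
import Mathlib
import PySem

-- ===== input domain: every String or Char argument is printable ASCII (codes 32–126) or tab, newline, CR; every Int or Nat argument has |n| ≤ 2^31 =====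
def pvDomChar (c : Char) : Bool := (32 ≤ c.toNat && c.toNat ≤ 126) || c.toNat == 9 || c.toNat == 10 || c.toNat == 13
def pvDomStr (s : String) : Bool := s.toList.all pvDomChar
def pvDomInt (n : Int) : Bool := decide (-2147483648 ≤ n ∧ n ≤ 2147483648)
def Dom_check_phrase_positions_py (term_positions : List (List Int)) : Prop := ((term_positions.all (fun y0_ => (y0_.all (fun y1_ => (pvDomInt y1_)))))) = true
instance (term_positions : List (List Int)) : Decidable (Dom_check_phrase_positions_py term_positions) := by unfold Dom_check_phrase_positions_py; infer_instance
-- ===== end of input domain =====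

-- B replaces A's per-candidate nested scan by one forward pass over the remaining terms
-- that filters the surviving set of phrase-start candidates (objective: alternative).
-- ===== PORT A =====
def check_phrase_positions_py (term_positions : List (List Int)) : Bool :=
  match term_positions with
  | [] => false
  | first :: _ =>
    -- for pos in term_positions[0]: ... return True on first full match; return False at the end
    first.any (fun pos =>
      -- inner loop over range(1, len) with a 'match' flag and break (false stays false)
      (PySem.List.pyRange 1 term_positions.length 1).foldl
        (fun m i => m && ((PySem.List.pyGetD term_positions i []).contains (pos + i))) true)

-- ===== PORT B =====
-- the 'for positions in term_positions[1:]' loop with the running 'offset' and the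
-- filtering set comprehension, as structural recursion over the tail
def pvPhraseLoop (cands : PySem.Set Int) (offset : Int) (rest : List (List Int)) : PySem.Set Int :=
  match rest with
  | [] => cands
  | positions :: rs =>
    pvPhraseLoop
      (PySem.Set.ofList (cands.filter (fun p => positions.contains (p + (offset + 1)))))
      (offset + 1) rs

def check_phrase_positions_py_alt (term_positions : List (List Int)) : Bool :=
  match term_positions with
  | [] => false
  | first :: rest => !(pvPhraseLoop (PySem.Set.ofList first) 0 rest).isEmpty

-- ===== PRECONDITION & SPEC =====
def Spec_check_phrase_positions_py (term_positions : List (List Int)) (out : Bool) : Prop := out = check_phrase_positions_py_alt term_positions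
instance (term_positions : List (List Int)) (out : Bool) : Decidable (Spec_check_phrase_positions_py term_positions out) := by unfold Spec_check_phrase_positions_py; infer_instance

-- ===== CLAIM =====
def Claim_equal_check_phrase_positions_py : Prop := ∀ (term_positions : List (List Int)), Dom_check_phrase_positions_py term_positions → Spec_check_phrase_positions_py term_positions (check_phrase_positions_py term_positions)

-- ===== LEMMAS AND PROOFS =====
-- A's inner flag loop is an 'all' over the range
theorem pv_foldl_and (l : List Int) (f : Int → Bool) (b : Bool) :
    l.foldl (fun m i => m && f i) b = (b && l.all f) := by
  induction l generalizing b with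
  | nil => simp
  | cons x xs ih => simp [List.foldl, ih, Bool.and_assoc]

-- membership in B's filtering loop
theorem pv_mem_phrase_loop (rest : List (List Int)) (c : PySem.Set Int) (off x : Int) :
    x ∈ pvPhraseLoop c off rest ↔
      x ∈ c ∧ ∀ j : Nat, j < rest.length → (x + off + (j + 1)) ∈ rest.getD j [] := by
  induction rest generalizing c off with
  | nil => simp [pvPhraseLoop]
  | cons ps rs ih =>
    rw [pvPhraseLoop, ih]
    simp only [PySem.Set.mem_ofList, List.mem_filter, List.contains_eq_mem, decide_eq_true_eq]
    constructor
    · rintro ⟨⟨hc, hps⟩, hall⟩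
      refine ⟨hc, fun j hj => ?_⟩
      cases j with
      | zero =>
        rw [show x + off + (((0 : ℕ) : ℤ) + 1) = x + (off + 1) from by push_cast; ring]
        simpa using hps
      | succ k =>
        rw [show x + off + (((k + 1 : ℕ) : ℤ) + 1) = x + (off + 1) + ((k : ℤ) + 1) from by
          push_cast; ring]
        simpa using hall k (by simpa using hj)
    · rintro ⟨hc, hall⟩
      refine ⟨⟨hc, ?_⟩, fun k hk => ?_⟩
      · have := hall 0 (by simp)
        rw [show x + off + (((0 : ℕ) : ℤ) + 1) = x + (off + 1) from by push_cast; ring] at this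
        simpa using this
      · have := hall (k + 1) (by simpa using hk)
        rw [show x + off + (((k + 1 : ℕ) : ℤ) + 1) = x + (off + 1) + ((k : ℤ) + 1) from by
          push_cast; ring] at this
        simpa using this

theorem check_phrase_positions_py_spec : Claim_equal_check_phrase_positions_py := by
  intro tp _
  unfold Spec_check_phrase_positions_py check_phrase_positions_py check_phrase_positions_py_alt
  match tp with
  | [] => rfl
  | first :: rest =>
    simp only []
    rw [Bool.eq_iff_iff]
    simp only [List.any_eq_true, pv_foldl_and, Bool.true_and, List.all_eq_true,
      Bool.not_eq_true', List.isEmpty_eq_false_iff_exists_mem]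
    constructor
    · rintro ⟨pos, hpos, hall⟩
      refine ⟨pos, (pv_mem_phrase_loop _ _ _ _).2
        ⟨(PySem.Set.mem_ofList _ _).2 hpos, fun j hj => ?_⟩⟩
      have hm : ((j : Int) + 1) ∈ PySem.List.pyRange 1 ((first :: rest).length : Int) 1 := by
        rw [PySem.List.mem_pyRange_one]
        constructor <;> [omega; (simp; omega)]
      have h1 := hall _ hm
      rw [List.contains_eq_mem, decide_eq_true_eq] at h1
      have hg : PySem.List.pyGetD (first :: rest) ((j : Int) + 1) [] = rest.getD j [] := by
        rw [show ((j : Int) + 1) = ((j + 1 : ℕ) : ℤ) from by push_cast; ring,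
          PySem.List.pyGetD_natCast]
        simp [List.getD]
      rw [hg] at h1
      rw [show pos + (0 : ℤ) + ((j : ℤ) + 1) = pos + ((j : ℤ) + 1) from by ring]
      exact h1
    · rintro ⟨x, hx⟩
      obtain ⟨hx0, hxi⟩ := (pv_mem_phrase_loop _ _ _ _).1 hx
      refine ⟨x, (PySem.Set.mem_ofList _ _).1 hx0, fun i hi => ?_⟩
      rw [PySem.List.mem_pyRange_one] at hi
      obtain ⟨h1, h2⟩ := hi
      have hjlt : (i - 1).toNat < rest.length := by simp at h2; omega
      have hxj := hxi (i - 1).toNat hjlt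
      have hg : PySem.List.pyGetD (first :: rest) i [] = rest.getD (i - 1).toNat [] := by
        rw [show i = ((i.toNat : ℕ) : ℤ) from by omega, PySem.List.pyGetD_natCast,
          show i.toNat = (i - 1).toNat + 1 from by omega]
        simp [List.getD]
      rw [List.contains_eq_mem, decide_eq_true_eq, hg]
      rw [show x + (0 : ℤ) + (((i - 1).toNat : ℤ) + 1) = x + i from by omega] at hxj
      exact hxj
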